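-- pv_equiv track=rewrite | github.com/omcandido/ORLA | src/argumentation/utils.py | values_to_ranking
-- ===== SOURCE A (Python) =====
-- def values_to_ranking(arg_val):
--     unique_values = list(set(arg_val.values()))
--     unique_values.sort(reverse=True)
--
--     ranking = []
--     for val in unique_values:
--         level = []
--         for arg in arg_val:
--             if arg_val[arg] == val:
--                 level.append(arg)
--         ranking.append(level)
--     return ranking
-- ===== SOURCE B (Python) =====
-- def values_to_ranking(arg_val):
--     # one pass: group keys by value, then emit groups for values sorted descending
--     groups = {}
--     for arg, val in arg_val.items():
--         groups.setdefault(val, []).append(arg)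
--     return [groups[v] for v in sorted(groups, reverse=True)]
-- ===== Notes on version B (the rewrite author's own statement) =====
-- stated objective: faster
-- what changed: replaces the per-unique-value rescans of the whole dict by a single grouping pass (value -> list of keys) followed by one sort of the unique values
import Mathlib
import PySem

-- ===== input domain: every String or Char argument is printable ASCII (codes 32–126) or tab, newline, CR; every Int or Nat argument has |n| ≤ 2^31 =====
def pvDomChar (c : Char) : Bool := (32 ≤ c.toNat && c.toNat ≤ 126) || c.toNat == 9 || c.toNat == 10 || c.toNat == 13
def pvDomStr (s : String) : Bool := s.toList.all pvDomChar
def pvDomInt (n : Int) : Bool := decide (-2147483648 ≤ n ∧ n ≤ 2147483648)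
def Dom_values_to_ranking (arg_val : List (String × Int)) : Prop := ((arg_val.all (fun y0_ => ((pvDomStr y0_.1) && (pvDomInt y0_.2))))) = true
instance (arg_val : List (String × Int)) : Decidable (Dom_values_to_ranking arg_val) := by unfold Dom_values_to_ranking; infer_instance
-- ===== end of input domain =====

-- B replaces A's rescan of the dict for every unique value by one grouping pass plus one sort (objective: faster).
-- ===== PORT A =====
def values_to_ranking (arg_val : List (String × Int)) : List (List String) :=
  let d := PySem.Dict.ofList arg_val          -- the Python argument is a dict
  let unique_values := PySem.List.sorted (PySem.Set.ofList d.values) (fun x => x) true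
  unique_values.foldl (fun ranking val =>
    ranking ++ [d.keys.foldl (fun level arg =>
      if d.getD arg 0 == val then level ++ [arg] else level) []]) []

-- ===== PORT B =====
def values_to_ranking_alt (arg_val : List (String × Int)) : List (List String) :=
  let d := PySem.Dict.ofList arg_val          -- the Python argument is a dict
  let groups := d.items.foldl
    (fun g p => g.modify p.2 [] (fun l => l ++ [p.1])) PySem.Dict.empty
  (PySem.List.sorted groups.keys (fun x => x) true).map (fun v => groups.getD v [])

-- ===== PRECONDITION & SPEC =====
def Spec_values_to_ranking (arg_val : List (String × Int)) (out : List (List String)) : Prop := out = values_to_ranking_alt arg_val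
instance (arg_val : List (String × Int)) (out : List (List String)) : Decidable (Spec_values_to_ranking arg_val out) := by unfold Spec_values_to_ranking; infer_instance

-- ===== CLAIM (what is proved, stated in full; the proofs are below) =====
def Claim_equal_values_to_ranking : Prop := ∀ (arg_val : List (String × Int)), Dom_values_to_ranking arg_val → Spec_values_to_ranking arg_val (values_to_ranking arg_val)

-- ===== LEMMAS AND PROOFS =====

-- ===== VERDICT (by name: the statement is the Claim_ definition above) =====
-- groups lookup: value v maps to the keys whose value is v, in order
lemma groups_getD (l : List (String × Int)) (g : PySem.Dict Int (List String)) (v : Int) :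
    (l.foldl (fun g p => g.modify p.2 [] (fun l => l ++ [p.1])) g).getD v []
      = g.getD v [] ++ (l.filter (fun p => p.2 == v)).map (fun p => p.1) := by
  induction l generalizing g with
  | nil => simp
  | cons p t ih =>
    simp only [List.foldl_cons, ih, List.filter_cons]
    by_cases h : p.2 = v
    · subst h; simp [PySem.Dict.getD_modify_self]
    · simp [h, PySem.Dict.getD_modify, Ne.symm h]

-- A's inner scan over the dict keys is the filtered key list of the items
lemma inner_scan (d : PySem.Dict String Int) (hnd : d.keys.Nodup) (v : Int) :
    d.keys.foldl (fun level arg => if d.getD arg 0 == v then level ++ [arg] else level) []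
      = (d.items.filter (fun p => p.2 == v)).map (fun p => p.1) := by
  rw [PySem.List.foldl_append_if_eq_filter, PySem.Dict.items_eq_map_keys d hnd 0,
    List.filter_map, List.map_map]
  simp only [Function.comp_def]
  simp

theorem values_to_ranking_spec : Claim_equal_values_to_ranking := by
  intro arg_val _
  unfold Spec_values_to_ranking
  simp only [values_to_ranking, values_to_ranking_alt]
  have hnd : (PySem.Dict.ofList arg_val).keys.Nodup := PySem.Dict.nodup_keys_ofList arg_val
  set d := PySem.Dict.ofList arg_val with hd
  have hkeys : (d.items.foldl
      (fun g p => g.modify p.2 [] (fun l => l ++ [p.1])) PySem.Dict.empty).keys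
      = PySem.Set.ofList d.values := by
    rw [PySem.Dict.keys_foldl_modify_key]
    simp [PySem.Dict.values, PySem.Set.update_nil_left]
  rw [PySem.List.foldl_append_singleton_eq_map, hkeys]
  simp only [List.nil_append]
  refine List.map_congr_left (fun v _ => ?_)
  rw [groups_getD, inner_scan d hnd v]
  simp
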